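-- pv_equiv track=rewrite | github.com/Doloreszjx/Computer-Network | ass/server.py | recursive_query
-- ===== SOURCE A (Python) =====
-- def recursive_query(domain, qtype, records, visited=None):
--     if visited is None:
--         visited = []
--
--     if qtype == 'A':
--         if domain in records and 'A' in records[domain]:
--             return domain, 'A', records[domain]['A']
--     elif qtype == 'NS':
--         if domain in records and 'NS' in records[domain]:
--             ns_domain = records[domain]['NS']
--             return recursive_query(ns_domain, 'A', records, visited)
--     elif qtype == 'CNAME' or (domain in records and 'CNAME' in records[domain]):
--         cname_domain = records[domain]['CNAME']
--         if cname_domain not in visited: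
--             visited.append(cname_domain)
--             return recursive_query(cname_domain, 'A', records, visited)
--     return None, None, None
-- ===== SOURCE B (Python) =====
-- def recursive_query(domain, qtype, records, visited=None):
--     # Non-recursive rewrite: pick a single target name to resolve, then one unified A-lookup.
--     if visited is None:
--         visited = []
--     target = None
--     if qtype == 'A':
--         target = domain
--     elif qtype == 'NS':
--         if domain in records and 'NS' in records[domain]:
--             target = records[domain]['NS']
--     elif qtype == 'CNAME' or (domain in records and 'CNAME' in records[domain]):
--         cname_domain = records[domain]['CNAME']
--         if cname_domain not in visited:
--             visited.append(cname_domain)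
--             target = cname_domain
--     if target is not None and target in records and 'A' in records[target]:
--         return target, 'A', records[target]['A']
--     return None, None, None
-- ===== Notes on version B (the rewrite author's own statement) =====
-- stated objective: simpler
-- what changed: Replaced A's depth-2 recursion with a non-recursive determine-target-then-resolve-once shape: an if/elif computes a single target name, followed by one unified A-record lookup.
import Mathlib
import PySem

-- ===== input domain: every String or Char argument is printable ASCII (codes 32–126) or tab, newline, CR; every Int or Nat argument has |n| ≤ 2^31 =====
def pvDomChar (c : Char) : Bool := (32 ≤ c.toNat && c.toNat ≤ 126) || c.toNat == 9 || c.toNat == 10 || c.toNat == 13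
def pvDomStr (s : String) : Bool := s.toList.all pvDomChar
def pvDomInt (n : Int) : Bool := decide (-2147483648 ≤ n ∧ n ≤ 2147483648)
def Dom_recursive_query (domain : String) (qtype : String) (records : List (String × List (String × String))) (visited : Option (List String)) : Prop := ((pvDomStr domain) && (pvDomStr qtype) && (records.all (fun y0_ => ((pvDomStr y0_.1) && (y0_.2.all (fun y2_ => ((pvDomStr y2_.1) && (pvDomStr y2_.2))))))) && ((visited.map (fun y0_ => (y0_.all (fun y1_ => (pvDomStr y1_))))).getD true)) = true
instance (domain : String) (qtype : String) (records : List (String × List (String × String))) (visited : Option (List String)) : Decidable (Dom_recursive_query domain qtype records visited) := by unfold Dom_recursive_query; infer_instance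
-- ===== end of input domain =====

-- B flattens A's depth-2 recursion into a non-recursive determine-target-then-resolve-once shape
-- (objective: simpler). Equivalence is about the RETURN value; both Pythons append the followed
-- CNAME to a caller-supplied `visited` list identically.

-- assoc-list (dict) helpers shared by both ports: first-match lookup / membership
def pvMem {α : Type} (rs : List (String × α)) (k : String) : Bool :=
  (rs.find? (fun p => p.1 == k)).isSome
def pvGet {α : Type} (rs : List (String × α)) (k : String) (dflt : α) : α :=
  ((rs.find? (fun p => p.1 == k)).map (·.2)).getD dflt
def pvGet? {α : Type} (rs : List (String × α)) (k : String) : Option α :=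
  (rs.find? (fun p => p.1 == k)).map (·.2)

-- ===== PORT A =====
-- literal transliteration of A's recursion (recursive calls always pass qtype 'A').
-- Where Python raises KeyError (records[domain]['CNAME'] missing) the port returns
-- (none, none, none); exactly those inputs are excluded by Pre_recursive_query.
def recursive_query (domain : String) (qtype : String) (records : List (String × List (String × String))) (visited : Option (List String)) : Option String × Option String × Option String :=
  let v := visited.getD []
  if qtype = "A" then
    if pvMem records domain && pvMem (pvGet records domain []) "A" then
      (some domain, some "A", some (pvGet (pvGet records domain []) "A" ""))
    else (none, none, none)
  else if qtype = "NS" then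
    if pvMem records domain && pvMem (pvGet records domain []) "NS" then
      recursive_query (pvGet (pvGet records domain []) "NS" "") "A" records (some v)
    else (none, none, none)
  else if qtype = "CNAME" || (pvMem records domain && pvMem (pvGet records domain []) "CNAME") then
    match (pvGet? records domain).bind (fun d => pvGet? d "CNAME") with
    | none => (none, none, none)  -- Python raises KeyError here; outside Pre_recursive_query
    | some cname =>
      if cname ∈ v then (none, none, none)
      else recursive_query cname "A" records (some (v ++ [cname]))
  else (none, none, none)
termination_by (if qtype = "A" then 0 else 1 : Nat)
decreasing_by all_goals simp [*]

-- ===== PORT B =====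
def recursive_query_alt (domain : String) (qtype : String) (records : List (String × List (String × String))) (visited : Option (List String)) : Option String × Option String × Option String :=
  let v := visited.getD []
  let target : Option String :=
    if qtype = "A" then some domain
    else if qtype = "NS" then
      if pvMem records domain && pvMem (pvGet records domain []) "NS" then
        some (pvGet (pvGet records domain []) "NS" "")
      else none
    else if qtype = "CNAME" || (pvMem records domain && pvMem (pvGet records domain []) "CNAME") then
      match (pvGet? records domain).bind (fun d => pvGet? d "CNAME") with
      | none => none  -- Python raises KeyError here; outside Pre_recursive_query
      | some cname => if cname ∈ v then none else some cname
    else none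
  match target with
  | some t =>
    if pvMem records t && pvMem (pvGet records t []) "A" then
      (some t, some "A", some (pvGet (pvGet records t []) "A" ""))
    else (none, none, none)
  | none => (none, none, none)

-- ===== PRECONDITION & SPEC =====
-- Pre_ excludes exactly the inputs where A raises KeyError: a 'CNAME' query for a domain
-- with no CNAME record (records[domain]['CNAME'] fails).
def Pre_recursive_query (domain : String) (qtype : String) (records : List (String × List (String × String))) (visited : Option (List String)) : Prop :=
  qtype = "CNAME" → ((pvGet? records domain).bind (fun d => pvGet? d "CNAME")).isSome
instance (domain : String) (qtype : String) (records : List (String × List (String × String))) (visited : Option (List String)) : Decidable (Pre_recursive_query domain qtype records visited) := by unfold Pre_recursive_query; infer_instance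
def pvWitness_recursive_query : String × String × (List (String × List (String × String))) × Option (List String) :=
  ("www.x.com", "A", [("www.x.com", [("A", "1.2.3.4")])], none)

def Spec_recursive_query (domain : String) (qtype : String) (records : List (String × List (String × String))) (visited : Option (List String)) (out : Option String × Option String × Option String) : Prop := out = recursive_query_alt domain qtype records visited
instance (domain : String) (qtype : String) (records : List (String × List (String × String))) (visited : Option (List String)) (out : Option String × Option String × Option String) : Decidable (Spec_recursive_query domain qtype records visited out) := by unfold Spec_recursive_query; infer_instance

-- ===== CLAIM (what is proved, stated in full; the proofs are below) =====
def Claim_equal_recursive_query : Prop := ∀ (domain : String) (qtype : String) (records : List (String × List (String × String))) (visited : Option (List String)), Dom_recursive_query domain qtype records visited → Pre_recursive_query domain qtype records visited → Spec_recursive_query domain qtype records visited (recursive_query domain qtype records visited)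

-- ===== LEMMAS AND PROOFS =====

-- A's port on qtype = "A" is exactly B's unified final lookup
theorem recursive_query_A (t : String) (records : List (String × List (String × String))) (w : Option (List String)) :
    recursive_query t "A" records w =
      (if pvMem records t && pvMem (pvGet records t []) "A" then
        (some t, some "A", some (pvGet (pvGet records t []) "A" ""))
      else (none, none, none)) := by
  rw [recursive_query]
  simp

theorem recursive_query_eq_alt (domain qtype : String) (records : List (String × List (String × String))) (visited : Option (List String)) :
    Pre_recursive_query domain qtype records visited →
    recursive_query domain qtype records visited = recursive_query_alt domain qtype records visited := by
  intro hpre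
  rw [recursive_query]
  unfold recursive_query_alt
  by_cases hA : qtype = "A"
  · subst hA; simp
  · by_cases hNS : qtype = "NS"
    · subst hNS
      simp only [hA, if_false]
      split
      · rw [recursive_query_A]
        split <;> simp
      · simp_all
    · simp only [if_neg hA, if_neg hNS]
      by_cases hC : (qtype = "CNAME" || (pvMem records domain && pvMem (pvGet records domain []) "CNAME")) = true
      · simp only [hC, if_true]
        cases hm : (pvGet? records domain).bind (fun d => pvGet? d "CNAME") with
        | none => simp
        | some cname =>
          by_cases hv : cname ∈ visited.getD []
          · simp [hv]
          · simp only [hv, if_false]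
            rw [recursive_query_A]
      · simp [hC]

-- ===== VERDICT (by name: the statement is the Claim_ definition above) =====
theorem recursive_query_spec : Claim_equal_recursive_query := by
  intro domain qtype records visited _ hpre
  unfold Spec_recursive_query
  exact recursive_query_eq_alt domain qtype records visited hpre
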